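-- pv_equiv track=rewrite | github.com/DongusJr/Ship_O_Cereal_H17 | products/views.py | _get_tags_from_url
-- ===== SOURCE A (Python) =====
-- def _get_tags_from_url(urlencode):
--     '''
--     get_tags_from_url
--
--     this method gets the previously used or inputted search criteria by
--     the user by having a list of the tags in use we can distinct the
--     encoded url and distinct between the tags and enable the user to
--     have multiple search criteria at once
--     '''
--     tags_in_use = []
--     tag_name = ""
--     tag_begin = False
--     for letter in urlencode:
--         if letter == "&":
--             tags_in_use.append(tag_name)
--             tag_name = ""
--             tag_begin = False
--         elif tag_begin:
--             tag_name += letter if letter != '+' else " "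
--         elif letter == '=':
--             tag_begin = True
--     tags_in_use.append(tag_name)
--     return tags_in_use
-- ===== SOURCE B (Python) =====
-- def _get_tags_from_url(urlencode):
--     # Split on '&'; each part's value is whatever follows the first '=',
--     # with '+' decoded to space. A part without '=' contributes "".
--     return [part.partition('=')[2].replace('+', ' ')
--             for part in urlencode.split('&')]
-- ===== Notes on version B (the rewrite author's own statement) =====
-- stated objective: idiomatic
-- what changed: Replaces the char-by-char state machine with tag_begin flag by a split('&') / partition('=') / replace comprehension over the segments.
import Mathlib
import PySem

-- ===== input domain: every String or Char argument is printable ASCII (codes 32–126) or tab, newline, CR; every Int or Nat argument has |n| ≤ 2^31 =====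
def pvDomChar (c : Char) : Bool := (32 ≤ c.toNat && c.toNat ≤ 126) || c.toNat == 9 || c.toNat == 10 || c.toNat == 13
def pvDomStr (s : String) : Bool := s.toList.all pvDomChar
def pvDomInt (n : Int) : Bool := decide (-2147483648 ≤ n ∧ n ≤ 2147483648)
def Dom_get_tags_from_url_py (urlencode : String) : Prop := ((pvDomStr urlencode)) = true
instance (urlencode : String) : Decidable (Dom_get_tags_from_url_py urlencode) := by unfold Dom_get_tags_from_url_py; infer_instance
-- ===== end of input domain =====

-- B replaces A's char-by-char state machine with an idiomatic split('&')/partition('=')/replace comprehension; same cost.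

-- ===== PORT A =====
-- one loop step of A: the letter cases '&' / tag_begin / '=' in the original order
def pvStepA (st : List (List Char) × List Char × Bool) (letter : Char) :
    List (List Char) × List Char × Bool :=
  let (tags, name, beg) := st
  if letter = '&' then (tags ++ [name], [], false)
  else if beg then (tags, name ++ [if letter ≠ '+' then letter else ' '], beg)
  else if letter = '=' then (tags, name, true)
  else (tags, name, beg)

def get_tags_from_url_py (urlencode : String) : List String :=
  let st := urlencode.toList.foldl pvStepA ([], [], false)
  (st.1 ++ [st.2.1]).map String.ofList

-- ===== PORT B =====
-- exact port of part.partition('=')[2] for the one-char separator '=':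
-- everything after the first '=', or [] when there is none
def pvPartitionAfterEq (cs : List Char) : List Char :=
  match cs with
  | [] => []
  | c :: rest => if c = '=' then rest else pvPartitionAfterEq rest

def get_tags_from_url_py_alt (urlencode : String) : List String :=
  (PySem.Chars.splitOn urlencode.toList ['&']).map
    (fun part => String.ofList (PySem.Chars.replace (pvPartitionAfterEq part) ['+'] [' ']))

-- ===== PRECONDITION & SPEC =====
def Spec_get_tags_from_url_py (urlencode : String) (out : List String) : Prop := out = get_tags_from_url_py_alt urlencode
instance (urlencode : String) (out : List String) : Decidable (Spec_get_tags_from_url_py urlencode out) := by unfold Spec_get_tags_from_url_py; infer_instance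

-- ===== CLAIM (what is proved, stated in full; the proofs are below) =====
def Claim_equal_get_tags_from_url_py : Prop := ∀ (urlencode : String), Dom_get_tags_from_url_py urlencode → Spec_get_tags_from_url_py urlencode (get_tags_from_url_py urlencode)

-- ===== LEMMAS AND PROOFS =====

-- '+' → ' ' on a whole segment
def pvRepl (cs : List Char) : List Char := cs.map (fun c => if c ≠ '+' then c else ' ')

-- structural specification of urlencode.split('&')
def pvSplitAmp : List Char → List (List Char)
  | [] => [[]]
  | c :: t =>
    if c = '&' then [] :: pvSplitAmp t
    else
      match pvSplitAmp t with
      | [] => [[c]]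
      | h :: r => (c :: h) :: r

-- what B computes per segment
def pvValOf (seg : List Char) : List Char := pvRepl (pvPartitionAfterEq seg)

-- structural specification of A's loop: the outputs still to come from state (name, beg)
def pvF : List Char → List Char → Bool → List (List Char)
  | [], name, _ => [name]
  | c :: t, name, beg =>
    if c = '&' then name :: pvF t [] false
    else if beg then pvF t (name ++ [if c ≠ '+' then c else ' ']) beg
    else if c = '=' then pvF t name true
    else pvF t name beg

theorem pvSplitAmp_ne_nil (cs : List Char) : pvSplitAmp cs ≠ [] := by
  cases cs with
  | nil => simp [pvSplitAmp]
  | cons c t =>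
    simp only [pvSplitAmp]
    split
    · simp
    · rcases h : pvSplitAmp t with _ | ⟨h', r⟩ <;> simp

theorem pvFoldA (cs : List Char) : ∀ (tags : List (List Char)) (name : List Char) (beg : Bool),
    (cs.foldl pvStepA (tags, name, beg)).1 ++ [(cs.foldl pvStepA (tags, name, beg)).2.1]
      = tags ++ pvF cs name beg := by
  induction cs with
  | nil => intro tags name beg; simp [pvF]
  | cons c t ih =>
    intro tags name beg
    simp only [List.foldl_cons, pvStepA, pvF]
    by_cases h1 : c = '&'
    · simp [h1, ih]
    · by_cases h2 : beg = true
      · simp [h1, h2, ih]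
      · simp only [Bool.not_eq_true] at h2
        by_cases h3 : c = '='
        · simp [h2, h3, ih]
        · simp [h1, h2, h3, ih]

theorem pvF_spec (cs : List Char) :
    (∀ name, pvF cs name true =
      (match pvSplitAmp cs with
       | [] => []
       | seg :: rest => (name ++ pvRepl seg) :: rest.map pvValOf)) ∧
    pvF cs [] false = (pvSplitAmp cs).map pvValOf := by
  induction cs with
  | nil => constructor <;> simp [pvF, pvSplitAmp, pvRepl, pvValOf, pvPartitionAfterEq]
  | cons c t ih =>
    obtain ⟨ihT, ihF⟩ := ih
    by_cases h1 : c = '&'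
    · constructor
      · intro name
        simp [pvF, pvSplitAmp, h1, ihF, pvRepl]
      · simp [pvF, pvSplitAmp, h1, ihF, pvValOf, pvRepl, pvPartitionAfterEq]
    · rcases hs : pvSplitAmp t with _ | ⟨seg, rest⟩
      · exact absurd hs (pvSplitAmp_ne_nil t)
      · constructor
        · intro name
          simp [pvF, pvSplitAmp, h1, hs, ihT, pvRepl]
        · by_cases h3 : c = '='
          · simp [pvF, pvSplitAmp, h3, hs, ihT, pvValOf, pvPartitionAfterEq]
          · simp [pvF, pvSplitAmp, h1, h3, hs, ihF, pvValOf, pvPartitionAfterEq]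

theorem pvGoAmp : ∀ (fuel : Nat) (l cur : List Char) (acc : List (List Char)), l.length ≤ fuel →
    PySem.Chars.splitOn.go ['&'] fuel l cur acc =
      acc.reverse ++
        (match pvSplitAmp l with
         | [] => []
         | h :: r => (cur.reverse ++ h) :: r) := by
  intro fuel
  induction fuel with
  | zero =>
    intro l cur acc hl
    interval_cases hl' : l.length
    · rw [List.length_eq_zero_iff] at hl'
      subst hl'
      rw [PySem.Chars.splitOn.go.eq_def]; simp [pvSplitAmp]
  | succ fuel ih =>
    intro l cur acc hl
    cases l with
    | nil => rw [PySem.Chars.splitOn.go.eq_def]; simp [pvSplitAmp]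
    | cons c rest =>
      simp only [List.length_cons, Nat.add_le_add_iff_right] at hl
      by_cases h1 : c = '&'
      · rcases hs : pvSplitAmp rest with _ | ⟨h', r⟩
        · exact absurd hs (pvSplitAmp_ne_nil rest)
        · rw [PySem.Chars.splitOn.go.eq_def]
          simp [List.isPrefixOf, h1, ih rest [] (cur.reverse :: acc) hl, pvSplitAmp, hs]
      · rcases hs : pvSplitAmp rest with _ | ⟨h', r⟩
        · exact absurd hs (pvSplitAmp_ne_nil rest)
        · have hne : ('&' == c) = false := by rw [beq_eq_false_iff_ne]; exact fun h => h1 h.symm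
          rw [PySem.Chars.splitOn.go.eq_def]
          simp [List.isPrefixOf, hne, ih rest (c :: cur) acc hl, pvSplitAmp, h1, hs]

theorem pvSplitOn_amp (cs : List Char) : PySem.Chars.splitOn cs ['&'] = pvSplitAmp cs := by
  rw [PySem.Chars.splitOn, pvGoAmp (cs.length + 1) cs [] [] (by omega)]
  rcases hs : pvSplitAmp cs with _ | ⟨h, r⟩
  · exact absurd hs (pvSplitAmp_ne_nil cs)
  · simp

theorem pvGoRepl : ∀ (fuel : Nat) (l acc : List Char), l.length ≤ fuel →
    PySem.Chars.replace.go ['+'] [' '] fuel l acc = acc.reverse ++ pvRepl l := by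
  intro fuel
  induction fuel with
  | zero =>
    intro l acc hl
    interval_cases hl' : l.length
    · rw [List.length_eq_zero_iff] at hl'
      subst hl'
      rw [PySem.Chars.replace.go.eq_def]; simp [pvRepl]
  | succ fuel ih =>
    intro l acc hl
    cases l with
    | nil => rw [PySem.Chars.replace.go.eq_def]; simp [pvRepl]
    | cons c rest =>
      simp only [List.length_cons, Nat.add_le_add_iff_right] at hl
      by_cases h1 : c = '+'
      · rw [PySem.Chars.replace.go.eq_def]
        simp [List.isPrefixOf, h1, ih rest (' ' :: acc) hl, pvRepl]
      · have hne : ('+' == c) = false := by rw [beq_eq_false_iff_ne]; exact fun h => h1 h.symm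
        rw [PySem.Chars.replace.go.eq_def]
        simp [List.isPrefixOf, hne, ih rest (c :: acc) hl, pvRepl, h1]

theorem pvReplace_plus (cs : List Char) :
    PySem.Chars.replace cs ['+'] [' '] = pvRepl cs := by
  rw [PySem.Chars.replace]
  simp [pvGoRepl cs.length cs [] (le_refl _)]

-- ===== VERDICT (by name: the statement is the Claim_ definition above) =====
theorem get_tags_from_url_py_spec : Claim_equal_get_tags_from_url_py := by
  intro u _
  unfold Spec_get_tags_from_url_py get_tags_from_url_py get_tags_from_url_py_alt
  rw [pvSplitOn_amp]
  simp only [pvFoldA u.toList [] [] false, List.nil_append, (pvF_spec u.toList).2]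
  simp [pvReplace_plus, pvValOf, Function.comp]
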